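-- pv_equiv track=rewrite | github.com/kzemek/snex | doc_helpers/gen_python_doc.py | format_decl
-- ===== SOURCE A (Python) =====
-- def format_decl(name: str, args: list[str] | None, unquote: bool = True) -> str:
--     args_str = "nil"
--     if args is not None:
--         args_str = ", ".join(map(lambda arg: format_decl(arg, None, False), args))
--         args_str = f"[{args_str}]"
--
--     name_str = f":{name}" if name.isidentifier() else f':"{name}"'
--     decl_str = f"{{ {name_str}, [generated: true], {args_str} }}"
--     return f"unquote({decl_str})" if unquote else decl_str
-- ===== SOURCE B (Python) =====
-- def _name_str(name):
--     return f":{name}" if name.isidentifier() else f':"{name}"'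
--
--
-- def _leaf(arg):
--     return f"{{ {_name_str(arg)}, [generated: true], nil }}"
--
--
-- def format_decl(name: str, args: list[str] | None, unquote: bool = True) -> str:
--     args_str = "nil" if args is None else "[" + ", ".join(_leaf(a) for a in args) + "]"
--     decl_str = f"{{ {_name_str(name)}, [generated: true], {args_str} }}"
--     return f"unquote({decl_str})" if unquote else decl_str
-- ===== Notes on version B (the rewrite author's own statement) =====
-- stated objective: simpler
-- what changed: Replaces A's self-recursive call (format_decl(arg, None, False) for each arg) with a flat, non-recursive construction using a dedicated leaf formatter, so the function is no longer recursive.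
import Mathlib
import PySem

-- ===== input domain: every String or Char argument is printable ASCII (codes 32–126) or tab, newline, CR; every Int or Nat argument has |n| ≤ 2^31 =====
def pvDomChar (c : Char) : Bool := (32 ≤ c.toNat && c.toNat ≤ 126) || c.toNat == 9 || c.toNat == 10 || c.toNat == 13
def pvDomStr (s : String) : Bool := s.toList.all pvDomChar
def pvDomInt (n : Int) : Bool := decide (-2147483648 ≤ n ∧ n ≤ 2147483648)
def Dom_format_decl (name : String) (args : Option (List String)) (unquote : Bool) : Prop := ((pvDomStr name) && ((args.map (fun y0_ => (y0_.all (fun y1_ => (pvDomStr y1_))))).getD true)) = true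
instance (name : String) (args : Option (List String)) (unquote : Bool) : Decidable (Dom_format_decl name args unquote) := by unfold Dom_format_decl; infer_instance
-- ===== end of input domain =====

-- B is simpler: A's self-recursion (format_decl(arg, None, False)) is replaced by a flat,
-- non-recursive construction with a dedicated leaf formatter.

-- str.isidentifier, hand-ported; exact on ASCII strings (Dom admits only ASCII).
def pyIsIdentifier (s : String) : Bool :=
  match s.toList with
  | [] => false
  | c :: rest =>
      (PySem.Chars.isalpha c || c == '_') &&
      rest.all (fun d => PySem.Chars.isalnum d || d == '_')

-- ===== PORT A =====
def format_decl (name : String) (args : Option (List String)) (unquote : Bool) : String :=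
  let args_str : String :=
    match args with
    | none => "nil"
    | some l => "[" ++ PySem.Str.join ", " (l.map (fun arg => format_decl arg none false)) ++ "]"
  let name_str := if pyIsIdentifier name then ":" ++ name else ":\"" ++ name ++ "\""
  let decl_str := "{ " ++ name_str ++ ", [generated: true], " ++ args_str ++ " }"
  if unquote then "unquote(" ++ decl_str ++ ")" else decl_str
termination_by (match args with | none => 0 | some _ => 1)
decreasing_by simp

-- ===== PORT B =====
def pvNameStr (name : String) : String :=
  if pyIsIdentifier name then ":" ++ name else ":\"" ++ name ++ "\""

def pvLeaf (arg : String) : String :=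
  "{ " ++ pvNameStr arg ++ ", [generated: true], nil }"

def format_decl_alt (name : String) (args : Option (List String)) (unquote : Bool) : String :=
  let args_str : String :=
    match args with
    | none => "nil"
    | some l => "[" ++ PySem.Str.join ", " (l.map pvLeaf) ++ "]"
  let decl_str := "{ " ++ pvNameStr name ++ ", [generated: true], " ++ args_str ++ " }"
  if unquote then "unquote(" ++ decl_str ++ ")" else decl_str

-- ===== PRECONDITION & SPEC =====
def Spec_format_decl (name : String) (args : Option (List String)) (unquote : Bool) (out : String) : Prop := out = format_decl_alt name args unquote
instance (name : String) (args : Option (List String)) (unquote : Bool) (out : String) : Decidable (Spec_format_decl name args unquote out) := by unfold Spec_format_decl; infer_instance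

-- ===== CLAIM (what is proved, stated in full; the proofs are below) =====
def Claim_equal_format_decl : Prop := ∀ (name : String) (args : Option (List String)) (unquote : Bool), Dom_format_decl name args unquote → Spec_format_decl name args unquote (format_decl name args unquote)

-- ===== LEMMAS AND PROOFS =====
theorem format_decl_leaf (a : String) : format_decl a none false = pvLeaf a := by
  rw [format_decl]
  simp [pvLeaf, pvNameStr, String.append_assoc]

theorem format_decl_eq_alt (name : String) (args : Option (List String)) (unquote : Bool) :
    format_decl name args unquote = format_decl_alt name args unquote := by
  cases args with
  | none => rw [format_decl]; rfl
  | some l =>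
      rw [format_decl]
      simp only [List.map_inj_left.mpr (fun a _ => format_decl_leaf a)]
      rfl

-- ===== VERDICT (by name: the statement is the Claim_ definition above) =====
theorem format_decl_spec : Claim_equal_format_decl := by
  intro name args unquote _
  exact format_decl_eq_alt name args unquote
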